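-- pv_equiv track=rewrite | github.com/jlapin1/spectral_similarity | seq_utils/peptide.py | get_stripped_seq
-- ===== SOURCE A (Python) =====
-- def get_stripped_seq(
--     input_string: str, isalpha: bool = True, isupper: bool = True
-- ) -> str:
--     """
--     Get a stripped version of the sequence containing only characters that match the given criteria.
--
--     Parameters
--     ----------
--     input_string : str
--         The input string.
--     isalpha : bool, optional
--         Whether to include alphabetic characters. Defaults to True.
--     isupper : bool, optional
--         Whether to include uppercase characters. Defaults to True.
--
--     Returns
--     -------
--     str
--         The stripped sequence.
--     """
--     if isalpha and isupper:
--         return "".join(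
--             char for char in input_string if char.isalpha() and char.isupper()
--         )
--     if isalpha:
--         return "".join(char for char in input_string if char.isalpha())
--     if isupper:
--         return "".join(char for char in input_string if char.isupper())
-- ===== SOURCE B (Python) =====
-- def get_stripped_seq(input_string: str, isalpha: bool = True, isupper: bool = True) -> str:
--     if not (isalpha or isupper):
--         return None
--     bad = set()
--     for ch in input_string:
--         if (isalpha and not ch.isalpha()) or (isupper and not ch.isupper()):
--             bad.add(ch)
--     return input_string.translate({ord(c): None for c in bad})
-- ===== Notes on version B (the rewrite author's own statement) =====
-- stated objective: alternative
-- what changed: Instead of A's three flag-selected filter comprehensions, B first collects the set of offending characters in one pass and then deletes all of them at once with str.translate on a deletion table, reproducing A's implicit None when both flags are False.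
import Mathlib
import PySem

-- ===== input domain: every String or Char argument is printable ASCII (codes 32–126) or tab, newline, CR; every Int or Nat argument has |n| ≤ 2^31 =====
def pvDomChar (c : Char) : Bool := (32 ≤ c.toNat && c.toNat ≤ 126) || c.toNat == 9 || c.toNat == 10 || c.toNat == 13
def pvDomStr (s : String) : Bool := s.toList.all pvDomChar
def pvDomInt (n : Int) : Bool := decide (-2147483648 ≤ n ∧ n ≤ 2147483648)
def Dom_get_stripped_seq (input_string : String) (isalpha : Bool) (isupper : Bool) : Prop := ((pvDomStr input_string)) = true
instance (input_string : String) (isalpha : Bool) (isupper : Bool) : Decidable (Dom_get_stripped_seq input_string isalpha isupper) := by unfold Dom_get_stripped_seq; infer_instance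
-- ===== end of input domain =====

-- B collects the offending characters into a set in one pass and deletes them all at once via a
-- str.translate deletion table, instead of A's three flag-selected filter comprehensions (alternative decomposition; return value only).

-- ===== PORT A =====
def get_stripped_seq (input_string : String) (isalpha : Bool) (isupper : Bool) : Option String :=
  if isalpha && isupper then
    some (String.ofList (input_string.toList.filter
      (fun char => PySem.Chars.isalpha char && PySem.Chars.isupper char)))
  else if isalpha then
    some (String.ofList (input_string.toList.filter (fun char => PySem.Chars.isalpha char)))
  else if isupper then
    some (String.ofList (input_string.toList.filter (fun char => PySem.Chars.isupper char)))
  else none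

-- ===== PORT B =====
-- the "offending-character" test from Source B's loop body
def gss_isBad (isalpha : Bool) (isupper : Bool) (ch : Char) : Bool :=
  (isalpha && !PySem.Chars.isalpha ch) || (isupper && !PySem.Chars.isupper ch)

-- the set 'bad' built by Source B's loop
def gss_bad (isalpha : Bool) (isupper : Bool) (l : List Char) : PySem.Set Char :=
  l.foldl (fun s ch => if gss_isBad isalpha isupper ch then PySem.Set.add s ch else s) PySem.Set.empty

def get_stripped_seq_alt (input_string : String) (isalpha : Bool) (isupper : Bool) : Option String :=
  if !(isalpha || isupper) then none
  else
    let bad := gss_bad isalpha isupper input_string.toList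
    -- str.translate with a deletion-only table {ord(c): None} removes exactly the characters in the
    -- table and keeps all others in order: ported by hand as this filter (exact for deletion tables)
    some (String.ofList (input_string.toList.filter (fun ch => !(PySem.Set.contains bad ch))))

-- ===== PRECONDITION & SPEC =====
def Spec_get_stripped_seq (input_string : String) (isalpha : Bool) (isupper : Bool) (out : Option String) : Prop := out = get_stripped_seq_alt input_string isalpha isupper
instance (input_string : String) (isalpha : Bool) (isupper : Bool) (out : Option String) : Decidable (Spec_get_stripped_seq input_string isalpha isupper out) := by unfold Spec_get_stripped_seq; infer_instance

-- ===== CLAIM (what is proved, stated in full; the proofs are below) =====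
def Claim_equal_get_stripped_seq : Prop := ∀ (input_string : String) (isalpha : Bool) (isupper : Bool), Dom_get_stripped_seq input_string isalpha isupper → Spec_get_stripped_seq input_string isalpha isupper (get_stripped_seq input_string isalpha isupper)

-- ===== LEMMAS AND PROOFS =====

-- membership in the conditionally-built set, for any accumulator
theorem gss_mem_fold (p : Char → Bool) (l : List Char) (s : PySem.Set Char) (c : Char) :
    c ∈ (l.foldl (fun s ch => if p ch then PySem.Set.add s ch else s) s)
      ↔ c ∈ s ∨ (c ∈ l ∧ p c = true) := by
  induction l generalizing s with
  | nil => simp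
  | cons x xs ih =>
    simp only [List.foldl_cons, List.mem_cons]
    by_cases hx : p x
    · rw [if_pos hx, ih, PySem.Set.mem_add]
      constructor
      · rintro (⟨h | rfl⟩ | ⟨h1, h2⟩)
        · exact Or.inl h
        · exact Or.inr ⟨Or.inl rfl, hx⟩
        · exact Or.inr ⟨Or.inr h1, h2⟩
      · rintro (h | ⟨rfl | h1, h2⟩)
        · exact Or.inl (Or.inl h)
        · exact Or.inl (Or.inr rfl)
        · exact Or.inr ⟨h1, h2⟩
    · rw [if_neg hx, ih]
      constructor
      · rintro (h | ⟨h1, h2⟩)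
        · exact Or.inl h
        · exact Or.inr ⟨Or.inr h1, h2⟩
      · rintro (h | ⟨rfl | h1, h2⟩)
        · exact Or.inl h
        · exact absurd h2 hx
        · exact Or.inr ⟨h1, h2⟩

-- deleting exactly the bad-set characters is filtering by the bad predicate
theorem gss_filter_eq (a u : Bool) (l : List Char) :
    l.filter (fun ch => !decide (ch ∈ gss_bad a u l))
      = l.filter (fun ch => !(gss_isBad a u ch)) := by
  apply List.filter_congr
  intro c hc
  unfold gss_bad
  simp [PySem.Set.empty, gss_mem_fold, hc]

-- ===== VERDICT (by name: the statement is the Claim_ definition above) =====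
theorem get_stripped_seq_spec : Claim_equal_get_stripped_seq := by
  intro s a u _
  unfold Spec_get_stripped_seq get_stripped_seq get_stripped_seq_alt
  cases a <;> cases u <;> simp [gss_filter_eq, gss_isBad]
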